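-- pv_equiv track=rewrite | github.com/ana01011/sarah_ai_backend | old_versions/main_backup_before_memory.py | is_identity_question
-- ===== SOURCE A (Python) =====
-- def is_identity_question(message):
--     """Check if asking about identity/creator"""
--     msg = message.lower()
--     identity_words = [
--         'who created', 'who made', 'who built', 'who designed',
--         'who developed', 'who are you', 'what are you',
--         'created by', 'made by', 'built by', 'designed by',
--         'your creator', 'your developer', 'your maker',
--         'openai', 'open ai', 'chatgpt', 'gpt', 'anthropic', 'claude',
--         'who owns you', 'who maintains you', 'where are you from',
--         'what company', 'which company', 'what organization'
--     ]
--     return any(word in msg for word in identity_words)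
-- ===== SOURCE B (Python) =====
-- import re
--
-- # All phrases are literal (letters and spaces only), so the alternation needs no escaping.
-- _PATTERN = ('who created|who made|who built|who designed|who developed|'
--             'who are you|what are you|created by|made by|built by|designed by|'
--             'your creator|your developer|your maker|openai|open ai|chatgpt|gpt|'
--             'anthropic|claude|who owns you|who maintains you|where are you from|'
--             'what company|which company|what organization')
--
-- _IDENTITY_RE = re.compile(_PATTERN)
--
--
-- def is_identity_question(message):
--     """Check if asking about identity/creator"""
--     return bool(_IDENTITY_RE.search(message.lower()))
-- ===== Notes on version B (the rewrite author's own statement) =====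
-- stated objective: idiomatic
-- what changed: Replaces the per-keyword substring-membership scans with one precompiled alternation regex (kept as a single pattern string) searched in a single left-to-right pass over the lowered message.
import Mathlib
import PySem

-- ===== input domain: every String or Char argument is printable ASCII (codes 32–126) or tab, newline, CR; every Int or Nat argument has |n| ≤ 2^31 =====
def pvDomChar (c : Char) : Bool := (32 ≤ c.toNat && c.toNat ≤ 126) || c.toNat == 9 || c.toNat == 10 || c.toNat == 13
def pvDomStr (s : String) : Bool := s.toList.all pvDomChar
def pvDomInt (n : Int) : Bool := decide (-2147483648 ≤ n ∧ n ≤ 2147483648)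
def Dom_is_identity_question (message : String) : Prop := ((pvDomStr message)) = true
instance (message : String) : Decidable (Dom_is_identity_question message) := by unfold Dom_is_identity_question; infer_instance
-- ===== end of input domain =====

-- B replaces A's per-keyword 'in' scans by one precompiled literal-alternation regex
-- (a single pattern string, split at '|' at compile time, searched in one pass). Objective: idiomatic.

-- ===== PORT A =====
def identityWords : List String :=
  ["who created", "who made", "who built", "who designed",
   "who developed", "who are you", "what are you",
   "created by", "made by", "built by", "designed by",
   "your creator", "your developer", "your maker",
   "openai", "open ai", "chatgpt", "gpt", "anthropic", "claude",
   "who owns you", "who maintains you", "where are you from",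
   "what company", "which company", "what organization"]

def is_identity_question (message : String) : Bool :=
  let msg := PySem.Str.lower message
  identityWords.any (fun word => PySem.Str.isIn word msg)

-- ===== PORT B =====
-- the regex source: one pattern string, exactly as in Source B
def identityPattern : List Char :=
  ("who created|who made|who built|who designed|who developed|" ++
   "who are you|what are you|created by|made by|built by|designed by|" ++
   "your creator|your developer|your maker|openai|open ai|chatgpt|gpt|" ++
   "anthropic|claude|who owns you|who maintains you|where are you from|" ++
   "what company|which company|what organization").toList

-- 'compiling' the literal alternation: split the pattern at '|'
def splitBar : List Char → List (List Char)
  | [] => [[]]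
  | c :: cs =>
    if c = '|' then [] :: splitBar cs
    else
      match splitBar cs with
      | [] => [[c]]
      | g :: gs => (c :: g) :: gs

def identityAlts : List (List Char) := splitBar identityPattern

-- does one alternation branch match at the current position? (charwise)
def matchHere : List Char → List Char → Bool
  | [], _ => true
  | _ :: _, [] => false
  | w :: ws, c :: cs => w == c && matchHere ws cs

-- re.search: try every position left to right
def searchAlts (alts : List (List Char)) : List Char → Bool
  | [] => alts.any (fun w => matchHere w [])
  | c :: cs => alts.any (fun w => matchHere w (c :: cs)) || searchAlts alts cs

def is_identity_question_alt (message : String) : Bool :=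
  searchAlts identityAlts (PySem.Chars.lower message.toList)

-- ===== PRECONDITION & SPEC =====
def Spec_is_identity_question (message : String) (out : Bool) : Prop := out = is_identity_question_alt message
instance (message : String) (out : Bool) : Decidable (Spec_is_identity_question message out) := by unfold Spec_is_identity_question; infer_instance

-- ===== CLAIM =====
def Claim_equal_is_identity_question : Prop := ∀ (message : String), Dom_is_identity_question message → Spec_is_identity_question message (is_identity_question message)

-- ===== LEMMAS AND PROOFS =====
lemma matchHere_eq_prefix (w s : List Char) : matchHere w s = decide (w <+: s) := by
  induction w generalizing s with
  | nil => simp [matchHere]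
  | cons a ws ih =>
    cases s with
    | nil => simp [matchHere]
    | cons c cs =>
      simp only [matchHere, ih, List.cons_prefix_cons]
      rcases eq_or_ne a c with h | h <;> simp [h]

lemma searchAlts_eq_true_iff (alts : List (List Char)) (s : List Char) :
    searchAlts alts s = true ↔ ∃ w ∈ alts, ∃ j, w <+: s.drop j := by
  induction s with
  | nil => simp [searchAlts, List.any_eq_true, matchHere_eq_prefix]
  | cons c cs ih =>
    simp only [searchAlts, Bool.or_eq_true, List.any_eq_true, matchHere_eq_prefix,
      decide_eq_true_eq, ih]
    constructor
    · rintro (⟨w, hw, hp⟩ | ⟨w, hw, j, hp⟩)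
      · exact ⟨w, hw, 0, by simpa using hp⟩
      · exact ⟨w, hw, j + 1, by simpa using hp⟩
    · rintro ⟨w, hw, j, hp⟩
      cases j with
      | zero => exact Or.inl ⟨w, hw, by simpa using hp⟩
      | succ j => exact Or.inr ⟨w, hw, j, by simpa using hp⟩

lemma searchAlts_eq_any_isIn (alts : List (List Char)) (s : List Char) :
    searchAlts alts s = alts.any (fun w => PySem.Chars.isIn w s) := by
  rcases h : searchAlts alts s with _ | _
  · symm
    rw [← Bool.not_eq_true] at h ⊢
    intro hc
    apply h
    rw [searchAlts_eq_true_iff]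
    rw [List.any_eq_true] at hc
    obtain ⟨w, hw, hin⟩ := hc
    obtain ⟨j, hp⟩ := (PySem.Chars.exists_prefix_drop_iff_isIn w s).mpr hin
    exact ⟨w, hw, j, hp⟩
  · symm
    rw [List.any_eq_true]
    obtain ⟨w, hw, j, hp⟩ := (searchAlts_eq_true_iff alts s).mp h
    exact ⟨w, hw, (PySem.Chars.exists_prefix_drop_iff_isIn w s).mp ⟨j, hp⟩⟩

-- the compiled alternation's branches are exactly A's keyword list
lemma identityAlts_eq : identityAlts = identityWords.map String.toList := by
  set_option maxRecDepth 10000 in decide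

-- ===== VERDICT =====
theorem is_identity_question_spec : Claim_equal_is_identity_question := by
  intro message _
  unfold Spec_is_identity_question is_identity_question is_identity_question_alt
  rw [searchAlts_eq_any_isIn, identityAlts_eq]
  simp [List.any_map, PySem.Str.isIn, PySem.Str.toList_lower, Function.comp_def]
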